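-- pv_equiv track=rewrite | github.com/vladesire/Vladesire-Time-Manager | time_manager/data/entries.py | total_entry
-- ===== SOURCE A (Python) =====
-- def total_entry(entries):
--     total = {}
--
--     for entry in entries:
--         for category in entry:
--             if category in total:
--                 total[category] += entry[category]
--             else:
--                 total[category] = entry[category]
--
--     return total
-- ===== SOURCE B (Python) =====
-- def total_entry(entries):
--     # Pass 1: universe of categories in first-encounter order.
--     cats = []
--     for entry in entries:
--         for c in entry:
--             if c not in cats:
--                 cats.append(c)
--     # Pass 2: per category, collect its values across entries and reduce with +.
--     result = {}
--     for c in cats: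
--         vals = [e[c] for e in entries if c in e]
--         acc = vals[0]
--         for v in vals[1:]:
--             acc = acc + v
--         result[c] = acc
--     return result
-- ===== Notes on version B (the rewrite author's own statement) =====
-- stated objective: alternative
-- what changed: B first builds the order-preserving universe of distinct categories in one scan and then, per category, scans the entries to collect and reduce that category's values with +, instead of A's single accumulate-as-you-go dict pass.
import Mathlib
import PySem

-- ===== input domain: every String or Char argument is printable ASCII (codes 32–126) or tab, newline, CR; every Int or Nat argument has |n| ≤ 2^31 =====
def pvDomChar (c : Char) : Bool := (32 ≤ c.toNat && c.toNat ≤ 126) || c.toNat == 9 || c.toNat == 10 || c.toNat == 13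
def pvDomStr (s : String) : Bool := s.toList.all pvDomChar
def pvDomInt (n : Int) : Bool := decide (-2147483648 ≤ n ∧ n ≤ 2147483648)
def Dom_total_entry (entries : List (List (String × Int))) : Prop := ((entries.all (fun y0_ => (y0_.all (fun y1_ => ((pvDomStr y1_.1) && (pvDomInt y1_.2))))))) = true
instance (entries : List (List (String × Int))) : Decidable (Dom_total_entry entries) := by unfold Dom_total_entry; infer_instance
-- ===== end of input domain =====

-- B builds the distinct-category universe first and then reduces each category's values
-- across the entries with a per-category scan (alternative decomposition, not faster).

-- ===== PORT A =====
def total_entry (entries : List (List (String × Int))) : List (String × Int) :=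
  (entries.foldl (fun total entry =>
    (PySem.Dict.mk entry).keys.foldl (fun total category =>
      match total.get? category with
      | some t => total.insert category (t + (PySem.Dict.mk entry).getD category 0)
      | none => total.insert category ((PySem.Dict.mk entry).getD category 0)) total)
    PySem.Dict.empty).items

-- ===== PORT B =====
def total_entry_alt (entries : List (List (String × Int))) : List (String × Int) :=
  let cats : List String := entries.foldl (fun cats entry =>
    (PySem.Dict.mk entry).keys.foldl (fun cats c => if c ∈ cats then cats else cats ++ [c]) cats) []
  (cats.foldl (fun result c =>
    let vals := (entries.filter (fun e => (PySem.Dict.mk e).contains c)).map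
      (fun e => (PySem.Dict.mk e).getD c 0)
    match vals with
    | [] => result            -- unreachable: c ∈ cats guarantees vals ≠ [] (totality guard)
    | v :: rest => result.insert c (rest.foldl (· + ·) v)) PySem.Dict.empty).items

-- ===== PRECONDITION & SPEC =====
-- Pre_ excludes inner association lists with duplicate keys: those are not valid
-- representations of the Python dicts A receives (a Python dict cannot hold duplicate keys).
def Pre_total_entry (entries : List (List (String × Int))) : Prop :=
  ∀ e ∈ entries, (e.map Prod.fst).Nodup

instance (entries : List (List (String × Int))) : Decidable (Pre_total_entry entries) := by
  unfold Pre_total_entry; infer_instance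

def pvWitness_total_entry : (List (List (String × Int))) :=
  [[("a", 1), ("b", 2)], [("a", 3)], []]

def Spec_total_entry (entries : List (List (String × Int))) (out : List (String × Int)) : Prop :=
  out = total_entry_alt entries
instance (entries : List (List (String × Int))) (out : List (String × Int)) : Decidable (Spec_total_entry entries out) := by unfold Spec_total_entry; infer_instance

-- ===== CLAIM (what is proved, stated in full; the proofs are below) =====
def Claim_equal_total_entry : Prop := ∀ (entries : List (List (String × Int))), Dom_total_entry entries → Pre_total_entry entries → Spec_total_entry entries (total_entry entries)

-- ===== LEMMAS AND PROOFS =====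

-- A's accumulation step on one (key, value) pair.
def stepA (total : PySem.Dict String Int) (kv : String × Int) : PySem.Dict String Int :=
  match total.get? kv.1 with
  | some t => total.insert kv.1 (t + kv.2)
  | none => total.insert kv.1 kv.2

-- distinct keys of the flattened pair list, in first-appearance order
def dkeys (l : List (String × Int)) : List String := PySem.Set.ofList (l.map Prod.fst)

-- total value of key k in the flattened pair list
def sumv (l : List (String × Int)) (k : String) : Int :=
  ((l.filter (fun p => p.1 == k)).map Prod.snd).sum

theorem hkeys_mk (e : List (String × Int)) : (PySem.Dict.mk e).keys = e.map Prod.fst := rfl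

-- with nodup keys, A's inner loop over an entry's keys is the fold of stepA over its pairs
theorem innerA (e : List (String × Int)) (h : (e.map Prod.fst).Nodup)
    (total : PySem.Dict String Int) :
    (PySem.Dict.mk e).keys.foldl (fun total category =>
      match total.get? category with
      | some t => total.insert category (t + (PySem.Dict.mk e).getD category 0)
      | none => total.insert category ((PySem.Dict.mk e).getD category 0)) total
    = e.foldl stepA total := by
  rw [hkeys_mk, List.foldl_map]
  apply PySem.List.foldl_congr_mem
  intro acc kv hkv
  obtain ⟨k, v⟩ := kv
  have hv : (PySem.Dict.mk e).getD k 0 = v :=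
    PySem.Dict.getD_of_mem_items (PySem.Dict.mk e) hkv (by rw [hkeys_mk]; exact h) 0
  simp only [stepA, hv]

theorem sumv_append_singleton (l : List (String × Int)) (a : String × Int) (k : String) :
    sumv (l ++ [a]) k = sumv l k + (if a.1 = k then a.2 else 0) := by
  simp only [sumv, List.filter_append, List.map_append, List.sum_append]
  by_cases h : a.1 = k <;> simp [h]

theorem sumv_zero_of_not_mem (l : List (String × Int)) (k : String)
    (h : k ∉ l.map Prod.fst) : sumv l k = 0 := by
  have : l.filter (fun p => p.1 == k) = [] := by
    rw [List.filter_eq_nil_iff]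
    intro p hp hk
    exact h (List.mem_map.mpr ⟨p, hp, by simpa using hk⟩)
  simp [sumv, this]

theorem keys_of_items (d : PySem.Dict String Int) (ks : List String) (f : String → Int)
    (h : d.items = ks.map (fun k => (k, f k))) : d.keys = ks := by
  simp only [PySem.Dict.keys, h, List.map_map]
  simp [Function.comp_def]

-- core: A's fold over any pair list produces exactly the dkeys/sumv table
theorem coreA (l : List (String × Int)) :
    (l.foldl stepA PySem.Dict.empty).items = (dkeys l).map (fun k => (k, sumv l k)) := by
  induction l using List.reverseRecOn with
  | nil => simp [dkeys, PySem.Dict.empty, PySem.Set.ofList]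
  | append_singleton l a ih =>
    rw [List.foldl_append, List.foldl_cons, List.foldl_nil]
    set d := l.foldl stepA PySem.Dict.empty with hd
    have hkeys : d.keys = dkeys l := keys_of_items d _ _ ih
    have hnodup : d.keys.Nodup := by rw [hkeys]; exact PySem.Set.nodup_ofList _
    have hdk : dkeys (l ++ [a]) = PySem.Set.add (dkeys l) a.1 := by
      simp only [dkeys, List.map_append]
      exact PySem.Set.ofList_append_singleton _ _
    by_cases hmem : a.1 ∈ dkeys l
    · have hget : d.get? a.1 = some (sumv l a.1) := by
        apply PySem.Dict.get?_of_mem_items _ _ hnodup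
        rw [ih]
        exact List.mem_map.mpr ⟨a.1, hmem, rfl⟩
      have hcont : d.contains a.1 = true := by
        rw [PySem.Dict.contains_eq_isSome_get?, hget]; rfl
      rw [stepA, hget]
      rw [PySem.Dict.items_insert_of_contains _ _ hcont, ih]
      rw [hdk, PySem.Set.add_of_mem hmem, List.map_map]
      apply List.map_congr_left
      intro k hk
      by_cases hka : k = a.1
      · subst hka
        simp [sumv_append_singleton]
      · simp [sumv_append_singleton, Ne.symm hka, hka]
    · have hget : d.get? a.1 = none := by
        rw [PySem.Dict.get?_eq_none_iff_not_mem_keys, hkeys]; exact hmem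
      have hcont : d.contains a.1 = false := by
        rw [PySem.Dict.contains_eq_isSome_get?, hget]; rfl
      rw [stepA, hget]
      rw [PySem.Dict.items_insert_of_not_contains _ _ hcont, ih]
      rw [hdk, PySem.Set.add_of_not_mem hmem, List.map_append]
      congr 1
      · apply List.map_congr_left
        intro k hk
        have hka : a.1 ≠ k := fun h => hmem (h ▸ hk)
        simp [sumv_append_singleton, hka]
      · have h0 : sumv l a.1 = 0 := by
          apply sumv_zero_of_not_mem
          intro hc
          exact hmem (by simpa [dkeys, PySem.Set.mem_ofList] using hc)
        simp [sumv_append_singleton, h0]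

-- B's category universe is dkeys of the flattened list
theorem catsB (entries : List (List (String × Int))) :
    entries.foldl (fun cats entry =>
      (PySem.Dict.mk entry).keys.foldl (fun cats c => if c ∈ cats then cats else cats ++ [c]) cats) []
    = dkeys (entries.flatMap id) := by
  have hinner : ∀ (cats : List String) (entry : List (String × Int)),
      (PySem.Dict.mk entry).keys.foldl (fun cats c => if c ∈ cats then cats else cats ++ [c]) cats
      = PySem.Set.update cats (entry.map Prod.fst) := by
    intro cats entry
    rw [hkeys_mk]
    have : (fun (cats : List String) c => if c ∈ cats then cats else cats ++ [c])
        = PySem.Set.add := by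
      funext s x
      rw [PySem.Set.add_eq_ite]
    rw [this]
    rfl
  have haux : ∀ (es : List (List (String × Int))) (s : PySem.Set String),
      es.foldl (fun cats entry =>
        (PySem.Dict.mk entry).keys.foldl (fun cats c => if c ∈ cats then cats else cats ++ [c]) cats) s
      = PySem.Set.update s ((es.flatMap id).map Prod.fst) := by
    intro es
    induction es with
    | nil => intro s; simp [PySem.Set.update_nil]
    | cons e rest ih =>
      intro s
      rw [List.foldl_cons, hinner, ih]
      simp only [List.flatMap_cons, List.map_append, id]
      rw [PySem.Set.update_append]
  rw [haux]
  rw [PySem.Set.update_nil_left]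
  rfl

theorem sumv_append (l1 l2 : List (String × Int)) (k : String) :
    sumv (l1 ++ l2) k = sumv l1 k + sumv l2 k := by
  simp [sumv, List.filter_append]

-- with nodup keys, an entry's contribution to key c is its looked-up value, defaulting to 0
theorem sumv_entry (e : List (String × Int)) (h : (e.map Prod.fst).Nodup) (c : String) :
    sumv e c = ((PySem.Dict.mk e).get? c).getD 0 := by
  induction e with
  | nil => simp [sumv, PySem.Dict.get?]
  | cons p rest ih =>
    simp only [List.map_cons, List.nodup_cons] at h
    obtain ⟨hp, hrest⟩ := h
    rw [PySem.Dict.get?_mk_cons]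
    by_cases hpc : (p.1 == c) = true
    · have hc : p.1 = c := by simpa using hpc
      have h0 : sumv rest c = 0 := sumv_zero_of_not_mem _ _ (hc ▸ by simpa using hp)
      have : sumv (p :: rest) c = p.2 + sumv rest c := by simp [sumv, hpc]
      rw [this, h0, if_pos hpc]
      simp
    · have hpc' : (p.1 == c) = false := by simpa using hpc
      have : sumv (p :: rest) c = sumv rest c := by simp [sumv, hpc']
      rw [this, if_neg hpc, ih hrest]

-- the summed values per category: B's filtered column sums to sumv of the flat list
theorem colsum (entries : List (List (String × Int)))
    (hpre : ∀ e ∈ entries, (e.map Prod.fst).Nodup) (c : String) :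
    ((entries.filter (fun e => (PySem.Dict.mk e).contains c)).map
      (fun e => (PySem.Dict.mk e).getD c 0)).sum = sumv (entries.flatMap id) c := by
  induction entries with
  | nil => simp [sumv]
  | cons e rest ih =>
    have hne : (e.map Prod.fst).Nodup := hpre e (by simp)
    have ihr := ih (fun e' he' => hpre e' (by simp [he']))
    have hsv : sumv e c = (PySem.Dict.mk e).getD c 0 := by
      rw [sumv_entry e hne c, PySem.Dict.getD_eq_get?_getD]
    rw [List.flatMap_cons, sumv_append, List.filter_cons]
    simp only [id_eq]
    by_cases hc : (PySem.Dict.mk e).contains c = true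
    · rw [if_pos hc, List.map_cons, List.sum_cons, ihr, hsv]
    · have hc' : (PySem.Dict.mk e).contains c = false := Bool.eq_false_iff.mpr hc
      have h0 : sumv e c = 0 := by
        rw [sumv_entry e hne c, (PySem.Dict.get?_eq_none_iff_contains _ _).mpr hc']
        rfl
      rw [if_neg hc, ihr, h0]
      simp

-- ===== VERDICT (by name: the statement is the Claim_ definition above) =====
theorem total_entry_spec : Claim_equal_total_entry := by
  intro entries _hdom hpre
  show total_entry entries = total_entry_alt entries
  -- A side: inner key loop = pair fold (innerA), then flatten and apply coreA
  have h1 : entries.foldl (fun total entry =>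
      (PySem.Dict.mk entry).keys.foldl (fun total category =>
        match total.get? category with
        | some t => total.insert category (t + (PySem.Dict.mk entry).getD category 0)
        | none => total.insert category ((PySem.Dict.mk entry).getD category 0)) total)
      PySem.Dict.empty
      = entries.foldl (fun total e => e.foldl stepA total) PySem.Dict.empty :=
    PySem.List.foldl_congr_mem _ _ _ _ (fun acc e he => innerA e (hpre e he) acc)
  -- B side: for each category of the universe, the body inserts the flat sum
  have h2 : (dkeys (entries.flatMap id)).foldl (fun result c =>
      let vals := (entries.filter (fun e => (PySem.Dict.mk e).contains c)).map
        (fun e => (PySem.Dict.mk e).getD c 0)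
      match vals with
      | [] => result
      | v :: rest => result.insert c (rest.foldl (· + ·) v)) PySem.Dict.empty
      = (dkeys (entries.flatMap id)).foldl (fun result c =>
          result.insert c (sumv (entries.flatMap id) c)) PySem.Dict.empty := by
    apply PySem.List.foldl_congr_mem
    intro acc c hc
    have hex : ∃ e ∈ entries, (PySem.Dict.mk e).contains c := by
      have : c ∈ (entries.flatMap id).map Prod.fst := by
        simpa [dkeys, PySem.Set.mem_ofList] using hc
      obtain ⟨p, hp, hpc⟩ := List.mem_map.mp this
      obtain ⟨e, he, hpe⟩ := List.mem_flatMap.mp hp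
      refine ⟨e, he, ?_⟩
      rw [PySem.Dict.contains_iff_mem_keys, hkeys_mk]
      exact List.mem_map.mpr ⟨p, by simpa using hpe, hpc⟩
    obtain ⟨e0, he0, hc0⟩ := hex
    have hfil : e0 ∈ entries.filter (fun e => (PySem.Dict.mk e).contains c) :=
      List.mem_filter.mpr ⟨he0, hc0⟩
    obtain ⟨v, rest, hvals⟩ : ∃ v rest,
        (entries.filter (fun e => (PySem.Dict.mk e).contains c)).map
          (fun e => (PySem.Dict.mk e).getD c 0) = v :: rest := by
      cases hm : (entries.filter (fun e => (PySem.Dict.mk e).contains c)).map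
          (fun e => (PySem.Dict.mk e).getD c 0) with
      | nil =>
        have hmem := (List.mem_map (f := fun e => (PySem.Dict.mk e).getD c 0)).mpr ⟨e0, hfil, rfl⟩
        rw [hm] at hmem
        simp at hmem
      | cons v rest => exact ⟨v, rest, rfl⟩
    simp only [hvals]
    have hsum : rest.foldl (· + ·) v = sumv (entries.flatMap id) c := by
      have hfa : rest.foldl (· + ·) v = v + (rest.map (fun x => x)).sum :=
        PySem.List.foldl_add rest (fun x => x) v
      rw [hfa, List.map_id', ← List.sum_cons, ← hvals, colsum entries hpre c]
    rw [hsum]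
  -- assemble
  have hA : total_entry entries = ((entries.flatMap id).foldl stepA PySem.Dict.empty).items := by
    unfold total_entry
    rw [h1]
    exact congrArg PySem.Dict.items List.foldl_flatMap.symm
  have hB : total_entry_alt entries
      = ((dkeys (entries.flatMap id)).foldl (fun result c =>
          result.insert c (sumv (entries.flatMap id) c)) PySem.Dict.empty).items := by
    unfold total_entry_alt
    rw [catsB]
    exact congrArg PySem.Dict.items h2
  rw [hA, hB, coreA, PySem.Dict.items_foldl_insert_fresh (k := fun c => c)
    (v := fun c => sumv (entries.flatMap id) c)
    (l := dkeys (entries.flatMap id)) (d := PySem.Dict.empty)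
    (by intro a _; exact PySem.Dict.contains_empty a)
    (by rw [List.map_id']; exact PySem.Set.nodup_ofList ((entries.flatMap id).map Prod.fst))]
  rfl
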